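-- pv_equiv track=rewrite | github.com/hydah/theking | scripts/validation.py | infer_expected_review_round
-- ===== SOURCE A (Python) =====
-- def infer_expected_review_round(history: list[str]) -> int:
--     round_count = 0
--     for index, status in enumerate(history):
--         if status != "in_review":
--             continue
--         previous_non_blocked = None
--         for previous_status in reversed(history[:index]):
--             if previous_status != "blocked":
--                 previous_non_blocked = previous_status
--                 break
--         if previous_non_blocked != "in_review":
--             round_count += 1
--     return round_count
-- ===== SOURCE B (Python) =====
-- def infer_expected_review_round(history: list[str]) -> int:
--     round_count = 0
--     last_non_blocked = None
--     for status in history: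
--         if status == "in_review" and last_non_blocked != "in_review":
--             round_count += 1
--         if status != "blocked":
--             last_non_blocked = status
--     return round_count
-- ===== Notes on version B (the rewrite author's own statement) =====
-- stated objective: alternative
-- what changed: Replaced the backward rescan of the prefix at every in_review entry by a single forward pass carrying the last non-blocked status in a running variable (worst-case O(n^2) becomes O(n); no speed-up measured on the generated inputs).
import Mathlib
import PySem

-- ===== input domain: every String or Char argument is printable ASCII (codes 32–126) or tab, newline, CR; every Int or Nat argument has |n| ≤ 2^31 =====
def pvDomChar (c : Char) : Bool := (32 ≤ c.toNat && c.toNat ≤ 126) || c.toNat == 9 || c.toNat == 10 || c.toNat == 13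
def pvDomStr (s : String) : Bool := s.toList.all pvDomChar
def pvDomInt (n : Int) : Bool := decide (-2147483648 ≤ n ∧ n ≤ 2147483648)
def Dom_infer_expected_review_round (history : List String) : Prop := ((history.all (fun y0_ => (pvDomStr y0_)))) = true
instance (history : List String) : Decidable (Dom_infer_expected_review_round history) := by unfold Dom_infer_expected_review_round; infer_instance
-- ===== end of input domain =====

-- B replaces A's backward rescan of the prefix by a single forward pass carrying the last non-blocked status (objective: alternative).

-- ===== PORT A =====
-- one step of A's outer loop: p = (index, status)
def pvStepA (history : List String) (round_count : Int) (p : Int × String) : Int :=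
  if p.2 ≠ "in_review" then round_count
  else
    -- inner loop: first element of reversed(history[:index]) that is not "blocked" (break), else None
    let previous_non_blocked :=
      (PySem.List.slice history none (some p.1)).reverse.find? (fun s => s ≠ "blocked")
    if previous_non_blocked ≠ some "in_review" then round_count + 1 else round_count

def infer_expected_review_round (history : List String) : Int :=
  (PySem.List.enumerate history).foldl (pvStepA history) 0

-- ===== PORT B =====
-- one step of B's single pass: state = (round_count, last_non_blocked)
def pvStepB (st : Int × Option String) (status : String) : Int × Option String :=
  ( if status = "in_review" ∧ st.2 ≠ some "in_review" then st.1 + 1 else st.1,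
    if status ≠ "blocked" then some status else st.2 )

def infer_expected_review_round_alt (history : List String) : Int :=
  (history.foldl pvStepB ((0 : Int), (none : Option String))).1

-- ===== PRECONDITION & SPEC =====
def Spec_infer_expected_review_round (history : List String) (out : Int) : Prop := out = infer_expected_review_round_alt history
instance (history : List String) (out : Int) : Decidable (Spec_infer_expected_review_round history out) := by unfold Spec_infer_expected_review_round; infer_instance

-- ===== CLAIM (what is proved, stated in full; the proofs are below) =====
def Claim_equal_infer_expected_review_round : Prop := ∀ (history : List String), Dom_infer_expected_review_round history → Spec_infer_expected_review_round history (infer_expected_review_round history)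

-- ===== LEMMAS AND PROOFS =====

-- invariant: B's running last_non_blocked equals A's backward scan over the processed prefix
theorem pv_main (history : List String) : ∀ (rest pre : List String), pre ++ rest = history →
    ∀ c : Int,
    (PySem.List.enumerate rest (pre.length : Int)).foldl (pvStepA history) c
      = (rest.foldl pvStepB (c, pre.reverse.find? (fun s => s ≠ "blocked"))).1 := by
  intro rest
  induction rest with
  | nil => intro pre _ c; simp [PySem.List.enumerate_nil]
  | cons s rest ih =>
    intro pre hh c
    have htake : PySem.List.slice history none (some ((pre.length : Nat) : Int))
        = pre := by
      rw [PySem.List.slice_to_natCast, ← hh, List.take_left]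
    have hstep : pvStepA history c ((pre.length : Int), s)
        = (pvStepB (c, pre.reverse.find? (fun t => t ≠ "blocked")) s).1 := by
      simp only [pvStepA, pvStepB, htake]
      by_cases hs : s = "in_review" <;>
        by_cases hp : pre.reverse.find? (fun t => t ≠ "blocked") = some "in_review" <;>
        simp_all
    have hlast : (pvStepB (c, pre.reverse.find? (fun t => t ≠ "blocked")) s).2
        = (pre ++ [s]).reverse.find? (fun t => t ≠ "blocked") := by
      simp only [pvStepB, List.reverse_append, List.reverse_singleton, List.singleton_append,
        List.find?_cons]
      by_cases hs : s = "blocked" <;> simp [hs]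
    rw [PySem.List.enumerate_cons, List.foldl_cons, List.foldl_cons, hstep,
        ← Prod.mk.eta (p := pvStepB (c, pre.reverse.find? (fun t => t ≠ "blocked")) s), hlast]
    have := ih (pre ++ [s]) (by simpa using hh)
      (pvStepB (c, pre.reverse.find? (fun t => t ≠ "blocked")) s).1
    simpa using this

-- ===== VERDICT (by name: the statement is the Claim_ definition above) =====
theorem infer_expected_review_round_spec : Claim_equal_infer_expected_review_round := by
  intro history _
  unfold Spec_infer_expected_review_round infer_expected_review_round infer_expected_review_round_alt
  have := pv_main history history [] rfl 0
  simpa [PySem.List.enumerate] using this
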